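-- pv_equiv track=rewrite | github.com/nooikko/harness | scripts/coverage-gate.py | group_files_by_package
-- ===== SOURCE A (Python) =====
-- PROJECT_DIRS = [
--     ("apps/web/", "apps/web"),
--     ("apps/orchestrator/", "apps/orchestrator"),
--     ("packages/ui/", "packages/ui"),
--     ("packages/logger/", "packages/logger"),
--     ("packages/database/", "packages/database"),
--     ("packages/plugin-contract/", "packages/plugin-contract"),
--     ("packages/plugins/context/", "packages/plugins/context"),
--     ("packages/plugins/discord/", "packages/plugins/discord"),
--     ("packages/plugins/web/", "packages/plugins/web"),
--     ("packages/plugins/delegation/", "packages/plugins/delegation"),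
--     ("packages/plugins/activity/", "packages/plugins/activity"),
--     ("packages/plugins/metrics/", "packages/plugins/metrics"),
--     ("packages/plugins/summarization/", "packages/plugins/summarization"),
--     ("packages/plugins/time/", "packages/plugins/time"),
--     ("packages/plugins/validator/", "packages/plugins/validator"),
--     ("packages/plugins/cron/", "packages/plugins/cron"),
--     ("packages/plugins/identity/", "packages/plugins/identity"),
--     ("packages/plugins/audit/", "packages/plugins/audit"),
--     ("packages/plugins/auto-namer/", "packages/plugins/auto-namer"),
--     ("packages/plugins/project/", "packages/plugins/project"),
--     ("packages/plugins/music/", "packages/plugins/music"),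
--     ("packages/plugins/search/", "packages/plugins/search"),
--     ("packages/plugins/storytelling/", "packages/plugins/storytelling"),
--     ("packages/plugins/tasks/", "packages/plugins/tasks"),
--     ("packages/plugins/playwright/", "packages/plugins/playwright"),
--     ("packages/oauth/", "packages/oauth"),
--     ("packages/plugins/outlook/", "packages/plugins/outlook"),
--     ("packages/plugins/calendar/", "packages/plugins/calendar"),
--     ("packages/plugins/outlook-calendar/", "packages/plugins/outlook-calendar"),
--     ("packages/plugins/logs/", "packages/plugins/logs"),
--     ("packages/cast-devices/", "packages/cast-devices"),
--     ("packages/plugins/ssh/", "packages/plugins/ssh"),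
--     ("packages/plugins/notifications/", "packages/plugins/notifications"),
--     ("packages/plugins/workspace/", "packages/plugins/workspace"),
--     ("packages/plugins/intent/", "packages/plugins/intent"),
--     ("packages/plugins/govee/", "packages/plugins/govee"),
-- ]
--
-- def group_files_by_package(testable_files: list[str]) -> dict[str, list[str]]:
--     """Group testable files by their package subdirectory.
--
--     Returns { pkg_subdir: [paths relative to that package] }.
--     Files with no matching package are skipped (no test runner for them).
--     """
--     groups: dict[str, list[str]] = {}
--     for filepath in testable_files:
--         for prefix, pkg_subdir in PROJECT_DIRS:
--             if filepath.startswith(prefix):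
--                 relative = filepath[len(prefix):]
--                 groups.setdefault(pkg_subdir, []).append(relative)
--                 break
--     return groups
-- ===== SOURCE B (Python) =====
-- APP_NAMES = {"web", "orchestrator"}
-- PACKAGE_NAMES = {"ui", "logger", "database", "plugin-contract", "oauth", "cast-devices"}
-- PLUGIN_NAMES = {
--     "context", "discord", "web", "delegation", "activity", "metrics",
--     "summarization", "time", "validator", "cron", "identity", "audit",
--     "auto-namer", "project", "music", "search", "storytelling", "tasks",
--     "playwright", "outlook", "calendar", "outlook-calendar", "logs",
--     "ssh", "notifications", "workspace", "intent", "govee",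
-- }
--
--
-- def group_files_by_package(testable_files: list[str]) -> dict[str, list[str]]:
--     """Group testable files by their package subdirectory.
--
--     Instead of scanning 36 (prefix, package) pairs per file, split the path
--     once and dispatch on its leading segments through three small name sets
--     (a two-level trie of the package tree).
--     """
--     groups: dict[str, list[str]] = {}
--     for filepath in testable_files:
--         parts = filepath.split("/")
--         if len(parts) > 2 and parts[0] == "apps" and parts[1] in APP_NAMES:
--             pkg, rel = "apps/" + parts[1], "/".join(parts[2:])
--         elif len(parts) > 2 and parts[0] == "packages" and parts[1] in PACKAGE_NAMES:
--             pkg, rel = "packages/" + parts[1], "/".join(parts[2:])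
--         elif len(parts) > 3 and parts[0] == "packages" and parts[1] == "plugins" and parts[2] in PLUGIN_NAMES:
--             pkg, rel = "packages/plugins/" + parts[2], "/".join(parts[3:])
--         else:
--             continue
--         groups.setdefault(pkg, []).append(rel)
--     return groups
-- ===== Notes on version B (the rewrite author's own statement) =====
-- stated objective: faster
-- what changed: A scans all 36 (prefix, package) pairs per file with startswith; B splits the path once and dispatches on its leading segments through three small name sets (a two-level trie of the package tree), so no per-file prefix scan remains.
import Mathlib
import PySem

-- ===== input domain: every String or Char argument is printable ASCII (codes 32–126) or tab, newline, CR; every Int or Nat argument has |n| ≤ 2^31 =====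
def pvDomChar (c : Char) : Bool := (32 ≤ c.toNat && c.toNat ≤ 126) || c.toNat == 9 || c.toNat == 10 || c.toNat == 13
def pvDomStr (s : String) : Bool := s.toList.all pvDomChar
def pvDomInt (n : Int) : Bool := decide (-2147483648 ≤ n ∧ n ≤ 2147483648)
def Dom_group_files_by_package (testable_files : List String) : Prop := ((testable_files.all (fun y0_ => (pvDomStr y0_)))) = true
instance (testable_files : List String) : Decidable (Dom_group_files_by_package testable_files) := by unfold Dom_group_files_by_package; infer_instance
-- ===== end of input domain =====

-- B replaces A's per-file scan over all 36 (prefix, package) pairs by splitting the path once and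
-- dispatching on its leading segments through three small name sets (a trie of the package tree);
-- objective: faster (constant-factor: no 36-prefix scan per file).

-- ===== PORT A =====
def pvProjectDirs : List (String × String) := [
  ("apps/web/", "apps/web"),
  ("apps/orchestrator/", "apps/orchestrator"),
  ("packages/ui/", "packages/ui"),
  ("packages/logger/", "packages/logger"),
  ("packages/database/", "packages/database"),
  ("packages/plugin-contract/", "packages/plugin-contract"),
  ("packages/plugins/context/", "packages/plugins/context"),
  ("packages/plugins/discord/", "packages/plugins/discord"),
  ("packages/plugins/web/", "packages/plugins/web"),
  ("packages/plugins/delegation/", "packages/plugins/delegation"),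
  ("packages/plugins/activity/", "packages/plugins/activity"),
  ("packages/plugins/metrics/", "packages/plugins/metrics"),
  ("packages/plugins/summarization/", "packages/plugins/summarization"),
  ("packages/plugins/time/", "packages/plugins/time"),
  ("packages/plugins/validator/", "packages/plugins/validator"),
  ("packages/plugins/cron/", "packages/plugins/cron"),
  ("packages/plugins/identity/", "packages/plugins/identity"),
  ("packages/plugins/audit/", "packages/plugins/audit"),
  ("packages/plugins/auto-namer/", "packages/plugins/auto-namer"),
  ("packages/plugins/project/", "packages/plugins/project"),
  ("packages/plugins/music/", "packages/plugins/music"),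
  ("packages/plugins/search/", "packages/plugins/search"),
  ("packages/plugins/storytelling/", "packages/plugins/storytelling"),
  ("packages/plugins/tasks/", "packages/plugins/tasks"),
  ("packages/plugins/playwright/", "packages/plugins/playwright"),
  ("packages/oauth/", "packages/oauth"),
  ("packages/plugins/outlook/", "packages/plugins/outlook"),
  ("packages/plugins/calendar/", "packages/plugins/calendar"),
  ("packages/plugins/outlook-calendar/", "packages/plugins/outlook-calendar"),
  ("packages/plugins/logs/", "packages/plugins/logs"),
  ("packages/cast-devices/", "packages/cast-devices"),
  ("packages/plugins/ssh/", "packages/plugins/ssh"),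
  ("packages/plugins/notifications/", "packages/plugins/notifications"),
  ("packages/plugins/workspace/", "packages/plugins/workspace"),
  ("packages/plugins/intent/", "packages/plugins/intent"),
  ("packages/plugins/govee/", "packages/plugins/govee")]

-- A's inner 'for prefix, pkg in PROJECT_DIRS: … break' (setdefault+append ported as Dict.modify)
def pvScanA (groups : PySem.Dict String (List String)) (filepath : String) :
    List (String × String) → PySem.Dict String (List String)
  | [] => groups
  | (pre, pkg) :: rest =>
    if PySem.Str.startswith filepath pre then
      groups.modify pkg [] (fun xs => xs ++ [PySem.Str.slice filepath (some (PySem.Str.len pre)) none])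
    else pvScanA groups filepath rest

def group_files_by_package (testable_files : List String) : List (String × List String) :=
  (testable_files.foldl (fun groups filepath => pvScanA groups filepath pvProjectDirs)
    PySem.Dict.empty).items

-- ===== PORT B =====
def pvAppNames : PySem.Set String := PySem.Set.ofList ["web", "orchestrator"]
def pvPackageNames : PySem.Set String := PySem.Set.ofList
  ["ui", "logger", "database", "plugin-contract", "oauth", "cast-devices"]
def pvPluginNames : PySem.Set String := PySem.Set.ofList
  ["context", "discord", "web", "delegation", "activity", "metrics",
   "summarization", "time", "validator", "cron", "identity", "audit",
   "auto-namer", "project", "music", "search", "storytelling", "tasks",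
   "playwright", "outlook", "calendar", "outlook-calendar", "logs",
   "ssh", "notifications", "workspace", "intent", "govee"]

-- exact port of filepath.split("/") (separator nonempty, so Python's split cannot raise)
def pvSplitSlash (s : String) : List String :=
  (PySem.Chars.splitOn s.toList ['/']).map String.ofList

-- B's if/elif dispatch: the (pkg, rel) pair for a split path, or none (→ 'continue')
def pvClassify (parts : List String) : Option (String × String) :=
  if 2 < PySem.List.len parts ∧ PySem.List.pyGetD parts 0 "" = "apps" ∧
       PySem.Set.contains pvAppNames (PySem.List.pyGetD parts 1 "") = true then
    some ("apps/" ++ PySem.List.pyGetD parts 1 "",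
          PySem.Str.join "/" (PySem.List.slice parts (some 2) none))
  else if 2 < PySem.List.len parts ∧ PySem.List.pyGetD parts 0 "" = "packages" ∧
       PySem.Set.contains pvPackageNames (PySem.List.pyGetD parts 1 "") = true then
    some ("packages/" ++ PySem.List.pyGetD parts 1 "",
          PySem.Str.join "/" (PySem.List.slice parts (some 2) none))
  else if 3 < PySem.List.len parts ∧ PySem.List.pyGetD parts 0 "" = "packages" ∧
       PySem.List.pyGetD parts 1 "" = "plugins" ∧
       PySem.Set.contains pvPluginNames (PySem.List.pyGetD parts 2 "") = true then
    some ("packages/plugins/" ++ PySem.List.pyGetD parts 2 "",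
          PySem.Str.join "/" (PySem.List.slice parts (some 3) none))
  else none

def group_files_by_package_alt (testable_files : List String) : List (String × List String) :=
  (testable_files.foldl (fun groups filepath =>
      match pvClassify (pvSplitSlash filepath) with
      | some (pkg, rel) => groups.modify pkg [] (fun xs => xs ++ [rel])
      | none => groups) PySem.Dict.empty).items

-- ===== PRECONDITION & SPEC =====
def Spec_group_files_by_package (testable_files : List String) (out : List (String × List String)) : Prop := out = group_files_by_package_alt testable_files
instance (testable_files : List String) (out : List (String × List String)) : Decidable (Spec_group_files_by_package testable_files out) := by unfold Spec_group_files_by_package; infer_instance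

-- ===== CLAIM (what is proved, stated in full; the proofs are below) =====
def Claim_equal_group_files_by_package : Prop := ∀ (testable_files : List String), Dom_group_files_by_package testable_files → Spec_group_files_by_package testable_files (group_files_by_package testable_files)

-- ===== LEMMAS AND PROOFS =====

-- character-level model of str.split('/')
def pvConsHead (x : List Char) : List (List Char) → List (List Char)
  | [] => [x]
  | p :: ps => (x ++ p) :: ps

def pvSplit : List Char → List (List Char)
  | [] => [[]]
  | c :: rest => if c = '/' then [] :: pvSplit rest else pvConsHead [c] (pvSplit rest)

theorem pvConsHead_ne_nil (x : List Char) (l : List (List Char)) : pvConsHead x l ≠ [] := by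
  cases l <;> simp [pvConsHead]

theorem pvSplit_ne_nil (cs : List Char) : pvSplit cs ≠ [] := by
  induction cs with
  | nil => simp [pvSplit]
  | cons c rest ih =>
    simp only [pvSplit]
    split
    · simp
    · exact pvConsHead_ne_nil _ _

theorem pvConsHead_of_ne_nil (x : List Char) (l : List (List Char)) (h : l ≠ []) :
    pvConsHead x l = (x ++ l.head h) :: l.tail := by
  cases l with
  | nil => exact absurd rfl h
  | cons p ps => simp [pvConsHead]

theorem pvConsHead_nil_of_ne (l : List (List Char)) (h : l ≠ []) : pvConsHead [] l = l := by
  cases l with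
  | nil => exact absurd rfl h
  | cons p ps => simp [pvConsHead]

theorem pvConsHead_append (x y : List Char) (l : List (List Char)) :
    pvConsHead (x ++ y) l = pvConsHead x (pvConsHead y l) := by
  cases l <;> simp [pvConsHead]

theorem pvSplit_go_eq (fuel : Nat) (l cur : List Char) (acc : List (List Char))
    (h : l.length < fuel) :
    PySem.Chars.splitOn.go ['/'] fuel l cur acc = acc.reverse ++ pvConsHead cur.reverse (pvSplit l) := by
  induction fuel generalizing l cur acc with
  | zero => omega
  | succ f ih =>
    cases l with
    | nil =>
      simp [PySem.Chars.splitOn.go, pvSplit, pvConsHead]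
    | cons c rest =>
      simp only [PySem.Chars.splitOn.go]
      by_cases hc : c = '/'
      · subst hc
        have hpre : List.isPrefixOf ['/'] ('/' :: rest) = true := by simp [List.isPrefixOf]
        rw [if_pos hpre]
        simp only [List.length_cons] at h
        have hd : List.drop (['/'] : List Char).length ('/' :: rest) = rest := by simp
        rw [hd, ih rest [] (cur.reverse :: acc) (by omega)]
        simp only [pvSplit, List.reverse_cons, List.reverse_nil,
          if_pos, pvConsHead_nil_of_ne _ (pvSplit_ne_nil rest)]
        simp [pvConsHead]
      · have hpre : List.isPrefixOf ['/'] (c :: rest) = false := by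
          simp [List.isPrefixOf]; exact fun hh => hc hh.symm
        rw [if_neg (by simp [hpre])]
        simp only [List.length_cons] at h
        rw [ih rest (c :: cur) acc (by omega)]
        simp [pvSplit, hc, List.reverse_cons, pvConsHead_append]

theorem pvSplitOn_eq (cs : List Char) : PySem.Chars.splitOn cs ['/'] = pvSplit cs := by
  rw [show PySem.Chars.splitOn cs ['/'] = PySem.Chars.splitOn.go ['/'] (cs.length + 1) cs [] [] from rfl]
  rw [pvSplit_go_eq _ _ _ _ (by omega)]
  simp [pvConsHead_nil_of_ne _ (pvSplit_ne_nil cs)]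

theorem pvSplit_free (cs : List Char) : ∀ p ∈ pvSplit cs, '/' ∉ p := by
  induction cs with
  | nil => simp [pvSplit]
  | cons c rest ih =>
    simp only [pvSplit]
    by_cases hc : c = '/'
    · simp only [if_pos hc]
      intro p hp
      rcases List.mem_cons.mp hp with h | h
      · simp [h]
      · exact ih p h
    · simp only [if_neg hc]
      rw [pvConsHead_of_ne_nil _ _ (pvSplit_ne_nil rest)]
      intro p hp
      rcases List.mem_cons.mp hp with h | h
      · subst h
        intro hm
        rcases List.mem_append.mp hm with h1 | h1
        · simp at h1; exact hc h1.symm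
        · exact ih _ (List.head_mem _) h1
      · exact ih p (List.mem_of_mem_tail h)

theorem pvJoin_cons (x : List Char) (ys : List (List Char)) (h : ys ≠ []) :
    PySem.Chars.join ['/'] (x :: ys) = x ++ '/' :: PySem.Chars.join ['/'] ys := by
  cases ys with
  | nil => exact absurd rfl h
  | cons y ys' => rw [PySem.Chars.join_cons_cons]; simp

theorem pvJoin_singleton' (x : List Char) : PySem.Chars.join ['/'] [x] = x := by
  simp [PySem.Chars.join, List.intercalate]

theorem pvJoin_consHead (x : List Char) (l : List (List Char)) (h : l ≠ []) :
    PySem.Chars.join ['/'] (pvConsHead x l) = x ++ PySem.Chars.join ['/'] l := by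
  cases l with
  | nil => exact absurd rfl h
  | cons p ps =>
    cases ps with
    | nil => simp [pvConsHead]
    | cons q qs =>
      simp only [pvConsHead]
      rw [PySem.Chars.join_cons_cons, PySem.Chars.join_cons_cons]
      simp

theorem pvJoin_pvSplit (cs : List Char) : PySem.Chars.join ['/'] (pvSplit cs) = cs := by
  induction cs with
  | nil => simp [pvSplit]
  | cons c rest ih =>
    simp only [pvSplit]
    by_cases hc : c = '/'
    · rw [if_pos hc, pvJoin_cons _ _ (pvSplit_ne_nil rest), ih, hc]; simp
    · rw [if_neg hc, pvJoin_consHead _ _ (pvSplit_ne_nil rest), ih]; simp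

theorem pvJoin_append (xs ys : List (List Char)) (hx : xs ≠ []) (hy : ys ≠ []) :
    PySem.Chars.join ['/'] (xs ++ ys) = PySem.Chars.join ['/'] xs ++ '/' :: PySem.Chars.join ['/'] ys := by
  induction xs with
  | nil => exact absurd rfl hx
  | cons x xs' ih =>
    cases xs' with
    | nil => simpa [pvJoin_singleton'] using pvJoin_cons x ys hy
    | cons b bs =>
      rw [List.cons_append, pvJoin_cons _ _ (by simp), pvJoin_cons _ _ (by simp),
        ih (by simp)]
      simp

theorem pvSplit_cons_of_free (a b : List Char) (h : '/' ∉ a) :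
    pvSplit (a ++ '/' :: b) = a :: pvSplit b := by
  induction a with
  | nil => simp [pvSplit]
  | cons c a' ih =>
    have hc : c ≠ '/' := by intro hh; exact h (by simp [hh])
    simp only [List.cons_append, pvSplit, if_neg hc]
    rw [ih (fun hm => h (by simp [hm]))]
    simp [pvConsHead]

theorem pvSplit_join_segs (segs : List (List Char)) (t : List Char)
    (hne : segs ≠ []) (hfree : ∀ p ∈ segs, '/' ∉ p) :
    pvSplit (PySem.Chars.join ['/'] segs ++ '/' :: t) = segs ++ pvSplit t := by
  induction segs with
  | nil => exact absurd rfl hne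
  | cons a rest ih =>
    cases rest with
    | nil =>
      rw [pvJoin_singleton', pvSplit_cons_of_free _ _ (hfree a (by simp))]
      simp
    | cons b bs =>
      rw [pvJoin_cons _ _ (by simp), List.append_assoc, List.cons_append,
        pvSplit_cons_of_free _ _ (hfree a (by simp)),
        ih (by simp) (fun p hp => hfree p (by simp [hp]))]
      simp

theorem pvRecon (cs : List Char) (k : Nat) (hk : 0 < k) (hlt : k < (pvSplit cs).length) :
    cs = PySem.Chars.join ['/'] ((pvSplit cs).take k) ++ '/' :: PySem.Chars.join ['/'] ((pvSplit cs).drop k) := by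
  conv_lhs => rw [← pvJoin_pvSplit cs]
  rw [← List.take_append_drop k (pvSplit cs)]
  rw [pvJoin_append _ _ (by
      intro hn
      have h3 := congrArg List.length hn
      rw [List.length_take] at h3
      simp only [List.length_nil] at h3
      omega)
    (by
      intro hn
      have h3 := congrArg List.length hn
      rw [List.length_drop] at h3
      simp only [List.length_nil] at h3
      omega)]
  simp

theorem pvCond_iff (cs : List Char) (segs : List (List Char)) (hne : segs ≠ [])
    (hfree : ∀ p ∈ segs, '/' ∉ p) :
    PySem.Chars.startswith cs (PySem.Chars.join ['/'] segs ++ ['/']) = true ↔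
      (pvSplit cs).take segs.length = segs ∧ segs.length < (pvSplit cs).length := by
  rw [PySem.Chars.startswith_iff]
  constructor
  · rintro ⟨t, ht⟩
    have hcs : cs = PySem.Chars.join ['/'] segs ++ '/' :: t := by
      rw [← ht]; simp
    rw [hcs, pvSplit_join_segs segs t hne hfree]
    constructor
    · rw [List.take_append_of_le_length (le_refl _), List.take_length]
    · have := pvSplit_ne_nil t
      have : 0 < (pvSplit t).length := List.length_pos_iff.mpr this
      simp
      omega
  · rintro ⟨h1, h2⟩
    have hk : 0 < segs.length := List.length_pos_iff.mpr hne
    have := pvRecon cs segs.length hk h2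
    rw [h1] at this
    obtain ⟨t, ht⟩ : ∃ t, cs = PySem.Chars.join ['/'] segs ++ '/' :: t := ⟨_, this⟩
    exact ⟨t, by rw [ht]; simp⟩

-- the package-name list and table facts (checked by decide on the literal table)
def pvLst : List String := pvProjectDirs.map (·.2)

theorem pvT1 : ∀ pp ∈ pvProjectDirs, pp.1.toList = pp.2.toList ++ ['/'] := by decide
theorem pvT2 : ∀ pp ∈ pvProjectDirs, (pvSplit pp.2.toList).length = 2 ∨ (pvSplit pp.2.toList).length = 3 := by decide
theorem pvT4 : ∀ pp ∈ pvProjectDirs, (pvSplit pp.2.toList).length = 3 →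
    ∀ qq ∈ pvProjectDirs, pvSplit qq.2.toList ≠ (pvSplit pp.2.toList).take 2 := by decide

theorem pvParts (fp : String) : pvSplitSlash fp = (pvSplit fp.toList).map String.ofList := by
  simp [pvSplitSlash, pvSplitOn_eq]

theorem pvFind?_unique {α : Type} (l : List α) (p : α → Bool) (x : α) (hx : x ∈ l) (hpx : p x = true)
    (hu : ∀ y ∈ l, p y = true → y = x) : l.find? p = some x := by
  induction l with
  | nil => simp at hx
  | cons a l' ih =>
    by_cases ha : p a = true
    · rw [List.find?_cons_of_pos ha, hu a (by simp) ha]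
    · rw [List.find?_cons_of_neg (by simpa using ha)]
      rcases List.mem_cons.mp hx with h | h
      · subst h; exact absurd hpx ha
      · exact ih h (fun y hy hpy => hu y (by simp [hy]) hpy)

theorem pvStartswith_iff (fp : String) (pp : String × String) (hpp : pp ∈ pvProjectDirs) :
    PySem.Str.startswith fp pp.1 = true ↔
      ((pvSplit fp.toList).take (pvSplit pp.2.toList).length = pvSplit pp.2.toList ∧
       (pvSplit pp.2.toList).length < (pvSplit fp.toList).length) := by
  have base := pvCond_iff fp.toList (pvSplit pp.2.toList) (pvSplit_ne_nil _) (pvSplit_free _)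
  rw [pvJoin_pvSplit] at base
  show PySem.Chars.startswith fp.toList pp.1.toList = true ↔ _
  rw [pvT1 pp hpp]
  exact base

theorem pvJoin_map (l : List (List Char)) :
    PySem.Str.join "/" (l.map String.ofList) = String.ofList (PySem.Chars.join ['/'] l) := by
  apply String.toList_inj.mp
  rw [PySem.Str.toList_join, String.toList_ofList, List.map_map]
  simp [Function.comp_def]

theorem pvOfListMap_inj (a b : List (List Char)) (h : a.map String.ofList = b.map String.ofList) :
    a = b := by
  have := congrArg (List.map String.toList) h
  simpa [List.map_map, Function.comp_def] using this

theorem pvSetMem (s : List String) (x : String) :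
    PySem.Set.contains (PySem.Set.ofList s) x = true ↔ x ∈ s := by
  have h : x ∈ PySem.Set.ofList s ↔ x ∈ s := PySem.Set.mem_ofList _ _
  rw [← h]
  simp [PySem.Set.contains]

-- the trie-dispatch shape of a package's segment list (Bool so the table facts are decide-checkable)
def pvShape : List String → Bool
  | [a, b] => (a == "apps" && PySem.Set.contains pvAppNames b) ||
              (a == "packages" && PySem.Set.contains pvPackageNames b)
  | [a, b, c] => a == "packages" && b == "plugins" && PySem.Set.contains pvPluginNames c
  | _ => false

theorem pvT5 : ∀ pkg ∈ pvLst, pvShape ((pvSplit pkg.toList).map String.ofList) = true := by decide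

theorem pvT6 : ∀ b ∈ (["web", "orchestrator"] : List String),
    ∃ pkg ∈ pvLst, (pvSplit pkg.toList).map String.ofList = ["apps", b] := by decide

theorem pvT7 : ∀ b ∈ (["ui", "logger", "database", "plugin-contract", "oauth", "cast-devices"] : List String),
    ∃ pkg ∈ pvLst, (pvSplit pkg.toList).map String.ofList = ["packages", b] := by decide

theorem pvT8 : ∀ c ∈ (["context", "discord", "web", "delegation", "activity", "metrics",
    "summarization", "time", "validator", "cron", "identity", "audit",
    "auto-namer", "project", "music", "search", "storytelling", "tasks",
    "playwright", "outlook", "calendar", "outlook-calendar", "logs",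
    "ssh", "notifications", "workspace", "intent", "govee"] : List String),
    ∃ pkg ∈ pvLst, (pvSplit pkg.toList).map String.ofList = ["packages", "plugins", c] := by decide

-- the trie-dispatch conditions characterise membership in the package-segment table
theorem pvE2 (u v : List Char) :
    (∃ pkg ∈ pvLst, [u, v] = pvSplit pkg.toList) ↔
      ((String.ofList u = "apps" ∧ PySem.Set.contains pvAppNames (String.ofList v) = true) ∨
       (String.ofList u = "packages" ∧ PySem.Set.contains pvPackageNames (String.ofList v) = true)) := by
  constructor
  · rintro ⟨pkg, hm, heq⟩
    have h := pvT5 pkg hm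
    rw [← congrArg (List.map String.ofList) heq] at h
    simp only [pvShape, List.map_cons, List.map_nil, Bool.or_eq_true, Bool.and_eq_true,
      beq_iff_eq] at h
    exact h
  · intro h
    have hseg : ∃ pkg ∈ pvLst,
        (pvSplit pkg.toList).map String.ofList = [String.ofList u, String.ofList v] := by
      rcases h with ⟨hu, hv⟩ | ⟨hu, hv⟩
      · obtain ⟨pkg, hm, he⟩ := pvT6 _ ((pvSetMem _ _).mp hv)
        exact ⟨pkg, hm, by rw [he, hu]⟩
      · obtain ⟨pkg, hm, he⟩ := pvT7 _ ((pvSetMem _ _).mp hv)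
        exact ⟨pkg, hm, by rw [he, hu]⟩
    obtain ⟨pkg, hm, he⟩ := hseg
    exact ⟨pkg, hm, pvOfListMap_inj _ _ (by simpa using he.symm)⟩

theorem pvE3 (u v w : List Char) :
    (∃ pkg ∈ pvLst, [u, v, w] = pvSplit pkg.toList) ↔
      (String.ofList u = "packages" ∧ String.ofList v = "plugins" ∧
       PySem.Set.contains pvPluginNames (String.ofList w) = true) := by
  constructor
  · rintro ⟨pkg, hm, heq⟩
    have h := pvT5 pkg hm
    rw [← congrArg (List.map String.ofList) heq] at h
    simp only [pvShape, List.map_cons, List.map_nil, Bool.and_eq_true, beq_iff_eq] at h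
    exact ⟨h.1.1, h.1.2, h.2⟩
  · rintro ⟨hu, hv, hw⟩
    obtain ⟨pkg, hm, he⟩ := pvT8 _ ((pvSetMem _ _).mp hw)
    refine ⟨pkg, hm, pvOfListMap_inj _ _ ?_⟩
    simp [he, hu, hv]

-- the unified "act at depth d" shape both sides reduce to
def pvActOn (g : PySem.Dict String (List String)) (ps : List (List Char)) (d : Nat) :
    PySem.Dict String (List String) :=
  g.modify (String.ofList (PySem.Chars.join ['/'] (ps.take d))) []
    (fun xs => xs ++ [String.ofList (PySem.Chars.join ['/'] (ps.drop d))])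

def pvMid (g : PySem.Dict String (List String)) (ps : List (List Char)) :
    PySem.Dict String (List String) :=
  if 2 < ps.length ∧ ∃ pkg ∈ pvLst, ps.take 2 = pvSplit pkg.toList then pvActOn g ps 2
  else if 3 < ps.length ∧ ∃ pkg ∈ pvLst, ps.take 3 = pvSplit pkg.toList then pvActOn g ps 3
  else g

theorem pvScanA_eq_find (g : PySem.Dict String (List String)) (fp : String)
    (tbl : List (String × String)) :
    pvScanA g fp tbl = (tbl.find? (fun pp => PySem.Str.startswith fp pp.1)).elim g
      (fun pp => g.modify pp.2 [] (fun xs => xs ++ [PySem.Str.slice fp (some (PySem.Str.len pp.1)) none])) := by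
  induction tbl with
  | nil => simp [pvScanA]
  | cons pp rest ih =>
    obtain ⟨pre, pkg⟩ := pp
    cases hsw : PySem.Str.startswith fp pre with
    | true =>
      have hsw' : PySem.Chars.startswith fp.toList pre.toList = true := hsw
      simp only [pvScanA, List.find?_cons]
      rw [if_pos hsw]
      simp [hsw']
    | false =>
      have hsw' : PySem.Chars.startswith fp.toList pre.toList = false := hsw
      simp only [pvScanA, List.find?_cons]
      rw [if_neg (by simp [hsw']), ih]
      simp [hsw']

theorem pvRel_eq (cs : List Char) (k : Nat) (segs : List (List Char)) (hk : 0 < k)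
    (hseg : (pvSplit cs).take k = segs) (hlt : k < (pvSplit cs).length) :
    cs.drop ((PySem.Chars.join ['/'] segs).length + 1) = PySem.Chars.join ['/'] ((pvSplit cs).drop k) := by
  have h := pvRecon cs k hk hlt
  rw [hseg] at h
  conv_lhs => rw [h]
  simp

-- A's per-file step equals the mid form on the split path
theorem pvA_eq_mid (g : PySem.Dict String (List String)) (fp : String) :
    pvScanA g fp pvProjectDirs = pvMid g (pvSplit fp.toList) := by
  unfold pvMid
  rw [pvScanA_eq_find]
  have hactA : ∀ pp : String × String, pp ∈ pvProjectDirs →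
      ∀ d : Nat, 0 < d → (pvSplit pp.2.toList).length = d →
      (pvSplit fp.toList).take d = pvSplit pp.2.toList → d < (pvSplit fp.toList).length →
      g.modify pp.2 [] (fun xs => xs ++ [PySem.Str.slice fp (some (PySem.Str.len pp.1)) none])
        = pvActOn g (pvSplit fp.toList) d := by
    intro pp hpp d hd hk htake hlt
    unfold pvActOn
    have hkey : String.ofList (PySem.Chars.join ['/'] ((pvSplit fp.toList).take d)) = pp.2 := by
      rw [htake, pvJoin_pvSplit, String.ofList_toList]
    have hval : PySem.Str.slice fp (some (PySem.Str.len pp.1)) none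
        = String.ofList (PySem.Chars.join ['/'] ((pvSplit fp.toList).drop d)) := by
      apply String.toList_inj.mp
      rw [PySem.Str.toList_slice, String.toList_ofList]
      rw [show PySem.Str.len pp.1 = ((pp.1.toList.length : Nat) : Int) from rfl]
      rw [PySem.Chars.slice_eq_listSlice, PySem.List.slice_from_natCast]
      have hlen1 : pp.1.toList.length = (PySem.Chars.join ['/'] ((pvSplit fp.toList).take d)).length + 1 := by
        rw [pvT1 pp hpp, htake]
        rw [pvJoin_pvSplit]
        simp
      rw [hlen1]
      exact pvRel_eq fp.toList d ((pvSplit fp.toList).take d) hd rfl hlt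
    rw [hkey, hval]
  by_cases h2 : 2 < (pvSplit fp.toList).length ∧
      ∃ pkg ∈ pvLst, (pvSplit fp.toList).take 2 = pvSplit pkg.toList
  · rw [if_pos h2]
    obtain ⟨hlen2, pkg, hpkg, htake⟩ := h2
    obtain ⟨pp, hpp, hpk⟩ := List.mem_map.mp hpkg
    rw [← hpk] at htake
    have hk : (pvSplit pp.2.toList).length = 2 := by
      rw [← htake, List.length_take]; omega
    have hmatch : PySem.Str.startswith fp pp.1 = true := by
      rw [pvStartswith_iff fp pp hpp, hk]
      exact ⟨htake, hlen2⟩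
    have huniq : ∀ qq ∈ pvProjectDirs, PySem.Str.startswith fp qq.1 = true → qq = pp := by
      intro qq hqq hq
      rw [pvStartswith_iff fp qq hqq] at hq
      rcases pvT2 qq hqq with hk' | hk'
      · have hq1 := hq.1
        rw [hk'] at hq1
        have hseq : pvSplit qq.2.toList = pvSplit pp.2.toList := by rw [← hq1]; exact htake
        have h2eq : qq.2 = pp.2 := by
          have hj := congrArg (PySem.Chars.join ['/']) hseq
          rw [pvJoin_pvSplit, pvJoin_pvSplit] at hj
          exact String.toList_inj.mp hj
        have h1eq : qq.1 = pp.1 := by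
          apply String.toList_inj.mp
          rw [pvT1 qq hqq, pvT1 pp hpp, h2eq]
        exact Prod.ext h1eq h2eq
      · have hq1 := hq.1
        rw [hk'] at hq1
        have hcontra : pvSplit pp.2.toList = (pvSplit qq.2.toList).take 2 := by
          rw [← hq1, List.take_take]
          norm_num
          exact htake.symm
        exact absurd hcontra (pvT4 qq hqq hk' pp hpp)
    rw [pvFind?_unique pvProjectDirs _ pp hpp hmatch huniq]
    exact hactA pp hpp 2 (by norm_num) hk htake hlen2
  · rw [if_neg h2]
    by_cases h3 : 3 < (pvSplit fp.toList).length ∧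
        ∃ pkg ∈ pvLst, (pvSplit fp.toList).take 3 = pvSplit pkg.toList
    · rw [if_pos h3]
      obtain ⟨hlen3, pkg, hpkg, htake⟩ := h3
      obtain ⟨pp, hpp, hpk⟩ := List.mem_map.mp hpkg
      rw [← hpk] at htake
      have hk : (pvSplit pp.2.toList).length = 3 := by
        rw [← htake, List.length_take]; omega
      have hmatch : PySem.Str.startswith fp pp.1 = true := by
        rw [pvStartswith_iff fp pp hpp, hk]
        exact ⟨htake, hlen3⟩
      have huniq : ∀ qq ∈ pvProjectDirs, PySem.Str.startswith fp qq.1 = true → qq = pp := by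
        intro qq hqq hq
        rw [pvStartswith_iff fp qq hqq] at hq
        rcases pvT2 qq hqq with hk' | hk'
        · have hq1 := hq.1
          have hq2 := hq.2
          rw [hk'] at hq1 hq2
          exact absurd ⟨hq2, qq.2, List.mem_map.mpr ⟨qq, hqq, rfl⟩, hq1⟩ h2
        · have hq1 := hq.1
          rw [hk'] at hq1
          have hseq : pvSplit qq.2.toList = pvSplit pp.2.toList := by rw [← hq1]; exact htake
          have h2eq : qq.2 = pp.2 := by
            have hj := congrArg (PySem.Chars.join ['/']) hseq
            rw [pvJoin_pvSplit, pvJoin_pvSplit] at hj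
            exact String.toList_inj.mp hj
          have h1eq : qq.1 = pp.1 := by
            apply String.toList_inj.mp
            rw [pvT1 qq hqq, pvT1 pp hpp, h2eq]
          exact Prod.ext h1eq h2eq
      rw [pvFind?_unique pvProjectDirs _ pp hpp hmatch huniq]
      exact hactA pp hpp 3 (by norm_num) hk htake hlen3
    · rw [if_neg h3]
      have hnone : pvProjectDirs.find? (fun qq : String × String => PySem.Str.startswith fp qq.1) = none := by
        rw [List.find?_eq_none]
        intro qq hqq hq
        rw [pvStartswith_iff fp qq hqq] at hq
        rcases pvT2 qq hqq with hk' | hk'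
        · have hq1 := hq.1
          have hq2 := hq.2
          rw [hk'] at hq1 hq2
          exact h2 ⟨hq2, qq.2, List.mem_map.mpr ⟨qq, hqq, rfl⟩, hq1⟩
        · have hq1 := hq.1
          have hq2 := hq.2
          rw [hk'] at hq1 hq2
          exact h3 ⟨hq2, qq.2, List.mem_map.mpr ⟨qq, hqq, rfl⟩, hq1⟩
      rw [hnone]
      rfl

-- B's per-file step (classify + single modify) equals the mid form on the split path
theorem pvClassify_short (parts : List String) (h : parts.length ≤ 2) :
    pvClassify parts = none := by
  unfold pvClassify
  rw [if_neg, if_neg, if_neg] <;>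
    exact fun hc => by
      have := hc.1
      simp [PySem.List.len] at this
      omega

theorem pvB_eq_mid (g : PySem.Dict String (List String)) (ps : List (List Char)) :
    (match pvClassify (ps.map String.ofList) with
     | some (pkg, rel) => g.modify pkg [] (fun xs => xs ++ [rel])
     | none => g) = pvMid g ps := by
  match ps with
  | [] | [u] | [u, v] =>
    rw [pvClassify_short _ (by simp)]
    unfold pvMid
    rw [if_neg (by rintro ⟨h, -⟩; simp at h),
        if_neg (by rintro ⟨h, -⟩; simp at h)]
  | u :: v :: w :: rest =>
    have hlen : (2 : Int) < PySem.List.len ((u :: v :: w :: rest).map String.ofList) := by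
      simp [PySem.List.len]
      omega
    have hlenps : 2 < (u :: v :: w :: rest).length := by simp
    have hlen3 : ((3 : Int) < PySem.List.len ((u :: v :: w :: rest).map String.ofList)) ↔
        3 < (u :: v :: w :: rest).length := by
      simp [PySem.List.len]
      omega
    have hg0 : PySem.List.pyGetD ((u :: v :: w :: rest).map String.ofList) 0 "" = String.ofList u := by
      simp [pysem]
    have hg1 : PySem.List.pyGetD ((u :: v :: w :: rest).map String.ofList) 1 "" = String.ofList v := by
      simp [pysem]
    have hg2 : PySem.List.pyGetD ((u :: v :: w :: rest).map String.ofList) 2 "" = String.ofList w := by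
      simp [pysem]
    have hs2 : PySem.List.slice ((u :: v :: w :: rest).map String.ofList) (some 2) none
        = ((u :: v :: w :: rest).drop 2).map String.ofList := by
      simp [pysem]
    have hs3 : PySem.List.slice ((u :: v :: w :: rest).map String.ofList) (some 3) none
        = ((u :: v :: w :: rest).drop 3).map String.ofList := by
      simp [pysem]
    have hrel2 : PySem.Str.join "/" (PySem.List.slice ((u :: v :: w :: rest).map String.ofList) (some 2) none)
        = String.ofList (PySem.Chars.join ['/'] ((u :: v :: w :: rest).drop 2)) := by
      rw [hs2, pvJoin_map]
    have hrel3 : PySem.Str.join "/" (PySem.List.slice ((u :: v :: w :: rest).map String.ofList) (some 3) none)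
        = String.ofList (PySem.Chars.join ['/'] ((u :: v :: w :: rest).drop 3)) := by
      rw [hs3, pvJoin_map]
    have htake2 : (u :: v :: w :: rest).take 2 = [u, v] := rfl
    have htake3 : (u :: v :: w :: rest).take 3 = [u, v, w] := rfl
    have hkey2 : ∀ a : String, String.ofList u = a →
        String.ofList (PySem.Chars.join ['/'] ((u :: v :: w :: rest).take 2)) = a ++ "/" ++ String.ofList v := by
      intro a ha
      rw [htake2, pvJoin_cons _ _ (by simp), pvJoin_singleton']
      rw [show u ++ '/' :: v = u ++ ['/'] ++ v by simp]
      rw [String.ofList_append, String.ofList_append, ha]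
    have hkey3 : String.ofList u = "packages" → String.ofList v = "plugins" →
        String.ofList (PySem.Chars.join ['/'] ((u :: v :: w :: rest).take 3))
          = "packages/plugins/" ++ String.ofList w := by
      intro hu hv
      rw [htake3, pvJoin_cons _ _ (by simp), pvJoin_cons _ _ (by simp), pvJoin_singleton']
      rw [show u ++ '/' :: (v ++ '/' :: w) = (u ++ ['/'] ++ (v ++ ['/'])) ++ w by simp]
      rw [String.ofList_append, String.ofList_append, String.ofList_append, String.ofList_append, hu, hv]
      rfl
    unfold pvClassify pvMid
    rw [hg0, hg1, hg2]
    by_cases hB1 : String.ofList u = "apps" ∧ PySem.Set.contains pvAppNames (String.ofList v) = true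
    · rw [if_pos ⟨hlen, hB1.1, hB1.2⟩,
        if_pos ⟨hlenps, (pvE2 u v).mpr (Or.inl hB1) |>.imp fun pkg h => ⟨h.1, by rw [htake2]; exact h.2⟩⟩]
      unfold pvActOn
      rw [hrel2, hkey2 "apps" hB1.1]
      rfl
    · by_cases hB2 : String.ofList u = "packages" ∧ PySem.Set.contains pvPackageNames (String.ofList v) = true
      · rw [if_neg (by rintro ⟨-, h1, h2⟩; exact hB1 ⟨h1, h2⟩),
          if_pos ⟨hlen, hB2.1, hB2.2⟩,
          if_pos ⟨hlenps, (pvE2 u v).mpr (Or.inr hB2) |>.imp fun pkg h => ⟨h.1, by rw [htake2]; exact h.2⟩⟩]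
        unfold pvActOn
        rw [hrel2, hkey2 "packages" hB2.1]
        rfl
      · have hC2 : ¬ (2 < (u :: v :: w :: rest).length ∧
            ∃ pkg ∈ pvLst, (u :: v :: w :: rest).take 2 = pvSplit pkg.toList) := by
          rintro ⟨-, hex⟩
          rw [htake2] at hex
          rcases (pvE2 u v).mp hex with h | h
          · exact hB1 h
          · exact hB2 h
        rw [if_neg (by rintro ⟨-, h1, h2⟩; exact hB1 ⟨h1, h2⟩),
          if_neg (by rintro ⟨-, h1, h2⟩; exact hB2 ⟨h1, h2⟩),
          if_neg hC2]
        by_cases hB3 : 3 < (u :: v :: w :: rest).length ∧ String.ofList u = "packages" ∧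
            String.ofList v = "plugins" ∧ PySem.Set.contains pvPluginNames (String.ofList w) = true
        · rw [if_pos ⟨hlen3.mpr hB3.1, hB3.2.1, hB3.2.2.1, hB3.2.2.2⟩,
            if_pos ⟨hB3.1, (pvE3 u v w).mpr hB3.2 |>.imp fun pkg h => ⟨h.1, by rw [htake3]; exact h.2⟩⟩]
          unfold pvActOn
          rw [hrel3, hkey3 hB3.2.1 hB3.2.2.1]
        · rw [if_neg (by rintro ⟨h0, h1, h2, h3⟩; exact hB3 ⟨hlen3.mp h0, h1, h2, h3⟩),
            if_neg (by
              rintro ⟨h0, hex⟩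
              rw [htake3] at hex
              exact hB3 ⟨h0, (pvE3 u v w).mp hex⟩)]

-- ===== VERDICT (by name: the statement is the Claim_ definition above) =====
theorem group_files_by_package_spec : Claim_equal_group_files_by_package := by
  intro fs _
  unfold Spec_group_files_by_package group_files_by_package group_files_by_package_alt
  have h : (fun (groups : PySem.Dict String (List String)) (filepath : String) =>
      pvScanA groups filepath pvProjectDirs)
      = (fun (groups : PySem.Dict String (List String)) filepath =>
          match pvClassify (pvSplitSlash filepath) with
          | some (pkg, rel) => groups.modify pkg [] (fun xs => xs ++ [rel])
          | none => groups) := by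
    funext g fp
    rw [pvA_eq_mid, pvParts, pvB_eq_mid]
  rw [h]
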